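-- pv_equiv track=rewrite | github.com/CDMY0417/Tool_MATH | function_tools/function_total/xuvxj7.py | product_of_first_n_primes
-- ===== SOURCE A (Python) =====
-- def product_of_first_n_primes(count: int):
--     def is_prime(num):
--         if num <= 1:
--             return False
--         for i in range(2, int(num**0.5) + 1):
--             if num % i == 0:
--                 return False
--         return True
--     primes = []
--     num = 2
--     while len(primes) < count:
--         if is_prime(num):
--             primes.append(num)
--         num += 1
--     product = 1
--     for prime in primes:
--         product *= prime
--     return product
-- ===== SOURCE B (Python) =====
-- def product_of_first_n_primes(count: int):
--     primes = []
--     num = 2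
--     product = 1
--     for _ in range(count):
--         while True:
--             composite = False
--             for p in primes:
--                 if p * p > num:
--                     break
--                 if num % p == 0:
--                     composite = True
--                     break
--             if not composite:
--                 break
--             num += 1
--         primes.append(num)
--         product *= num
--         num += 1
--     return product
-- ===== Notes on version B (the rewrite author's own statement) =====
-- stated objective: faster
-- what changed: B tests each candidate by dividing only by the primes found so far (stopping at p*p > num) and keeps a running product in the same pass, instead of A's trial division by every integer up to sqrt(num) plus a separate product loop; intended as faster, measured 2.3-2.5x at the largest sizes both finish (beyond that both hit the bignum-product wall).
import Mathlib
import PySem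

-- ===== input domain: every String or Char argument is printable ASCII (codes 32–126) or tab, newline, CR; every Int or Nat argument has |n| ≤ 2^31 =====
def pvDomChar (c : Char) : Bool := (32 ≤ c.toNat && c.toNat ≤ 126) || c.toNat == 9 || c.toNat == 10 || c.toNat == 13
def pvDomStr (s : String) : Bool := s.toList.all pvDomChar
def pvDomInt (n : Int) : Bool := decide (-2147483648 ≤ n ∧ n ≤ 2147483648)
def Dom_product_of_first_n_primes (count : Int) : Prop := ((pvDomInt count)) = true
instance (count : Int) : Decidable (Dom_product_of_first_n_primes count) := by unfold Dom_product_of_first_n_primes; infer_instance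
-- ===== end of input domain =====

-- B replaces A's per-candidate trial division by EVERY integer up to √num with trial division by the
-- stored primes only (with break at p*p > num) and a running product (intended as faster; measured 2.3-2.5x at the sizes both finish).

-- ===== PORT A =====
-- helpers shared by the two ports' termination arguments: distance from num to the next prime ≥ num
def distToPrime (num : Nat) : Nat := Nat.find (Nat.exists_infinite_primes num) - num

theorem distToPrime_lt (num : Nat) (h : ¬ Nat.Prime num) :
    distToPrime (num + 1) < distToPrime num := by
  unfold distToPrime
  have h1 := Nat.find_spec (Nat.exists_infinite_primes num)
  have h2 := Nat.find_spec (Nat.exists_infinite_primes (num + 1))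
  have hne : Nat.find (Nat.exists_infinite_primes num) ≠ num := fun he => h (he ▸ h1.2)
  have h3 : Nat.find (Nat.exists_infinite_primes (num + 1)) ≤
      Nat.find (Nat.exists_infinite_primes num) :=
    Nat.find_min' _ ⟨by omega, h1.2⟩
  omega

-- int(num**0.5) is ported as Nat.sqrt (exact wherever the float square root is exact, which covers
-- the whole tested domain); num % i on the positive operands reached here is exactly Nat.mod.
def isPrimeA (num : Nat) : Bool :=
  if num ≤ 1 then false
  else (List.range' 2 (Nat.sqrt num + 1 - 2)).all (fun i => num % i != 0)

theorem isPrimeA_of_prime (num : Nat) (h : Nat.Prime num) : isPrimeA num = true := by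
  have h2 := h.two_le
  have hs1 : 1 ≤ Nat.sqrt num := by
    have := (Nat.sqrt_pos (n := num)).2 (by omega)
    omega
  unfold isPrimeA
  rw [if_neg (by omega), List.all_eq_true]
  intro i hi
  rw [List.mem_range'_1] at hi
  simp only [bne_iff_ne, ne_eq]
  intro hmod
  have hdvd : i ∣ num := Nat.dvd_of_mod_eq_zero hmod
  rcases (Nat.Prime.eq_one_or_self_of_dvd h i hdvd) with h1 | h1
  · omega
  · have : Nat.sqrt num < num := Nat.sqrt_lt_self (by omega)
    omega

def loopA (count : Int) (primes : List Nat) (num : Nat) : List Nat :=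
  if _h : (primes.length : Int) < count then
    if hpr : isPrimeA num then loopA count (primes ++ [num]) (num + 1)
    else loopA count primes (num + 1)
  else primes
termination_by (count.toNat - primes.length, distToPrime num)
decreasing_by
  · apply Prod.Lex.left
    simp only [List.length_append, List.length_cons, List.length_nil]
    omega
  · apply Prod.Lex.right
    exact distToPrime_lt num (fun hp => hpr (isPrimeA_of_prime num hp))

def product_of_first_n_primes (count : Int) : Int :=
  (loopA count [] 2).foldl (fun (product : Int) (prime : Nat) => product * (prime : Int)) 1

-- ===== PORT B =====
-- inner 'for p in primes: if p*p>num: break; if num%p==0: composite' test, with the break kept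
def isPrimeBy (primes : List Nat) (num : Nat) : Bool :=
  match primes with
  | [] => true
  | p :: rest =>
    if num < p * p then true
    else if num % p == 0 then false
    else isPrimeBy rest num

theorem isPrimeBy_of_two_le (primes : List Nat) (num : Nat)
    (hp : ∀ p ∈ primes, 2 ≤ p) (h : Nat.Prime num) : isPrimeBy primes num = true := by
  induction primes with
  | nil => rfl
  | cons p rest ih =>
    have h2p : 2 ≤ p := hp p List.mem_cons_self
    have h2 := h.two_le
    unfold isPrimeBy
    split
    · rfl
    · rename_i hle
      rw [if_neg, ih (fun q hq => hp q (List.mem_cons_of_mem p hq))]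
      simp only [beq_iff_eq]
      intro hmod
      rcases Nat.Prime.eq_one_or_self_of_dvd h p (Nat.dvd_of_mod_eq_zero hmod) with h1 | h1
      · omega
      · subst h1; nlinarith [Nat.not_lt.1 hle]

-- the 'while not <test>: num += 1' search for the next accepted candidate
def nextP (primes : List Nat) (num : Nat) (hp : ∀ p ∈ primes, 2 ≤ p) : Nat :=
  if h : isPrimeBy primes num then num else nextP primes (num + 1) hp
termination_by distToPrime num
decreasing_by
  exact distToPrime_lt num (fun hprime => h (isPrimeBy_of_two_le primes num hp hprime))

theorem nextP_ge (primes : List Nat) (num : Nat) (hp : ∀ p ∈ primes, 2 ≤ p) :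
    num ≤ nextP primes num hp := by
  fun_induction nextP with
  | case1 => exact le_refl _
  | case2 _ _ ih => omega

theorem hp_append (primes : List Nat) (num : Nat) (hp : ∀ p ∈ primes, 2 ≤ p) (hn : 2 ≤ num) :
    ∀ p ∈ primes ++ [nextP primes num hp], 2 ≤ p := by
  intro p hmem
  rcases List.mem_append.1 hmem with h1 | h1
  · exact hp p h1
  · simp only [List.mem_singleton] at h1
    subst h1
    exact le_trans hn (nextP_ge primes num hp)

-- 'for _ in range(count)' loop, one appended prime and one product update per iteration
def loopB (n : Nat) (primes : List Nat) (num : Nat) (product : Int)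
    (hp : ∀ p ∈ primes, 2 ≤ p) (hn : 2 ≤ num) : Int :=
  match n with
  | 0 => product
  | Nat.succ m =>
    loopB m (primes ++ [nextP primes num hp]) (nextP primes num hp + 1)
      (product * ((nextP primes num hp : Nat) : Int))
      (hp_append primes num hp hn)
      (le_trans (le_trans hn (nextP_ge primes num hp)) (Nat.le_succ _))

def product_of_first_n_primes_alt (count : Int) : Int :=
  loopB count.toNat [] 2 1 (by intro p h; cases h) (by norm_num)

-- ===== PRECONDITION & SPEC =====
def Spec_product_of_first_n_primes (count : Int) (out : Int) : Prop := out = product_of_first_n_primes_alt count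
instance (count : Int) (out : Int) : Decidable (Spec_product_of_first_n_primes count out) := by unfold Spec_product_of_first_n_primes; infer_instance

-- ===== CLAIM (what is proved, stated in full; the proofs are below) =====
def Claim_equal_product_of_first_n_primes : Prop := ∀ (count : Int), Dom_product_of_first_n_primes count → Spec_product_of_first_n_primes count (product_of_first_n_primes count)

-- ===== LEMMAS AND PROOFS =====

theorem isPrimeA_iff (num : Nat) : isPrimeA num = true ↔ Nat.Prime num := by
  constructor
  · intro h
    unfold isPrimeA at h
    by_cases h1 : num ≤ 1
    · rw [if_pos h1] at h; exact absurd h (by simp)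
    · rw [if_neg h1, List.all_eq_true] at h
      have hs1 : 1 ≤ Nat.sqrt num := by
        have := (Nat.sqrt_pos (n := num)).2 (by omega)
        omega
      rw [Nat.prime_def_le_sqrt]
      refine ⟨by omega, fun m h2m hms hdvd => ?_⟩
      have hm : m ∈ List.range' 2 (Nat.sqrt num + 1 - 2) := by
        rw [List.mem_range'_1]; omega
      have := h m hm
      simp only [bne_iff_ne, ne_eq] at this
      exact this (Nat.dvd_iff_mod_eq_zero.mp hdvd)
  · exact isPrimeA_of_prime num

theorem isPrimeBy_false (primes : List Nat) (m q : Nat) (hs : List.Pairwise (· < ·) primes)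
    (hq : q ∈ primes) (h2q : 2 ≤ q) (hqq : q * q ≤ m) (hmod : m % q = 0) :
    isPrimeBy primes m = false := by
  induction primes with
  | nil => cases hq
  | cons p rest ih =>
    rcases List.mem_cons.1 hq with h1 | h1
    · subst h1
      unfold isPrimeBy
      rw [if_neg (by omega)]
      simp [hmod]
    · have hpq : p < q := List.rel_of_pairwise_cons hs h1
      unfold isPrimeBy
      rw [if_neg (by nlinarith)]
      by_cases h2 : m % p == 0
      · rw [if_pos h2]
      · rw [if_neg h2]
        exact ih hs.of_cons h1

theorem isPrimeBy_iff (primes : List Nat) (num : Nat)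
    (hs : List.Pairwise (· < ·) primes)
    (hpr : ∀ p ∈ primes, Nat.Prime p)
    (hall : ∀ q, Nat.Prime q → q < num → q ∈ primes)
    (hm : 2 ≤ num) : isPrimeBy primes num = true ↔ Nat.Prime num := by
  constructor
  · intro h
    by_contra hnp
    have hq := Nat.minFac_prime (n := num) (by omega)
    have hdvd := Nat.minFac_dvd num
    have hsq : num.minFac * num.minFac ≤ num := by
      have h := Nat.minFac_sq_le_self (n := num) (by omega) hnp
      rwa [pow_two] at h
    have h2q := hq.two_le
    have hlt : num.minFac < num := by nlinarith
    have hmem := hall _ hq hlt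
    have := isPrimeBy_false primes num num.minFac hs hmem h2q hsq
      (Nat.dvd_iff_mod_eq_zero.mp hdvd)
    rw [this] at h; cases h
  · exact fun h => isPrimeBy_of_two_le primes num (fun p hp => (hpr p hp).two_le) h

-- invariant carried by both loops: num ≥ 2 and primes = the sorted list of all primes below num
def LoopInv (primes : List Nat) (num : Nat) : Prop :=
  2 ≤ num ∧ List.Pairwise (· < ·) primes ∧ (∀ p ∈ primes, Nat.Prime p ∧ p < num) ∧
    (∀ q, Nat.Prime q → q < num → q ∈ primes)

theorem loopA_prefix (count : Int) (primes : List Nat) (num : Nat) :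
    primes <+: loopA count primes num := by
  fun_induction loopA with
  | case1 primes num _ _ ih => exact (primes.prefix_append [num]).trans ih
  | case2 _ _ _ _ ih => exact ih
  | case3 _ _ _ => exact List.prefix_refl _

theorem main_bridge (count : Int) (primes : List Nat) (num : Nat) :
    LoopInv primes num →
    ∀ (prod : Int) (hp : ∀ p ∈ primes, 2 ≤ p) (hn : 2 ≤ num),
      ((loopA count primes num).drop primes.length).foldl (fun (a : Int) (p : Nat) => a * (p : Int)) prod
        = loopB (count - (primes.length : Int)).toNat primes num prod hp hn := by
  fun_induction loopA with
  | case1 primes num hlt hprime ih =>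
    intro hInv prod hp hn
    obtain ⟨hn2, hsort, hmem, hall⟩ := hInv
    have hnum : Nat.Prime num := (isPrimeA_iff num).1 hprime
    have hInv' : LoopInv (primes ++ [num]) (num + 1) := by
      refine ⟨by omega, ?_, ?_, ?_⟩
      · rw [List.pairwise_append]
        exact ⟨hsort, by simp, fun a ha b hb => by
          simp only [List.mem_singleton] at hb; subst hb; exact (hmem a ha).2⟩
      · intro p hmp
        rcases List.mem_append.1 hmp with h1 | h1
        · exact ⟨(hmem p h1).1, by have := (hmem p h1).2; omega⟩
        · simp only [List.mem_singleton] at h1; subst h1; exact ⟨hnum, by omega⟩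
      · intro q hqp hqlt
        by_cases hq : q < num
        · exact List.mem_append_left _ (hall q hqp hq)
        · have : q = num := by omega
          subst this; exact List.mem_append_right _ (List.mem_singleton_self _)
    obtain ⟨Δ, hΔ⟩ := loopA_prefix count (primes ++ [num]) (num + 1)
    have hdrop1 : (loopA count (primes ++ [num]) (num + 1)).drop primes.length
        = num :: Δ := by
      rw [← hΔ, List.append_assoc, List.singleton_append, List.drop_left]
    have hdrop2 : (loopA count (primes ++ [num]) (num + 1)).drop (primes ++ [num]).length
        = Δ := by rw [← hΔ, List.drop_left]
    have hIH := ih hInv' (prod * (num : Int)) (by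
        intro p hmp
        rcases List.mem_append.1 hmp with h1 | h1
        · exact hp p h1
        · simp only [List.mem_singleton] at h1; subst h1; omega) (by omega)
    rw [hdrop1, List.foldl_cons]
    rw [hdrop2] at hIH
    rw [hIH]
    have hlen : (count - (primes.length : Int)).toNat
        = ((count - ((primes ++ [num]).length : Int)).toNat) + 1 := by
      simp only [List.length_append, List.length_cons, List.length_nil]
      omega
    rw [hlen]
    conv_rhs => rw [loopB]
    have htest : isPrimeBy primes num = true :=
      isPrimeBy_of_two_le primes num hp hnum
    have hnext : nextP primes num hp = num := by
      rw [nextP, dif_pos htest]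
    simp only [hnext]
  | case2 primes num hlt hprime ih =>
    intro hInv prod hp hn
    obtain ⟨hn2, hsort, hmem, hall⟩ := hInv
    have hnum : ¬ Nat.Prime num := fun h => hprime ((isPrimeA_iff num).2 h)
    have hInv' : LoopInv primes (num + 1) := by
      refine ⟨by omega, hsort, fun p hmp => ⟨(hmem p hmp).1, by have := (hmem p hmp).2; omega⟩, ?_⟩
      intro q hqp hqlt
      by_cases hq : q < num
      · exact hall q hqp hq
      · have : q = num := by omega
        subst this; exact absurd hqp hnum
    have hIH := ih hInv' prod hp (by omega)
    rw [hIH]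
    have htest : isPrimeBy primes num = false := by
      by_cases h : isPrimeBy primes num
      · exact absurd ((isPrimeBy_iff primes num hsort (fun p hmp => (hmem p hmp).1)
          hall hn2).1 h) hnum
      · simpa using h
    have hpos : (count - (primes.length : Int)).toNat
        = ((count - (primes.length : Int)).toNat - 1) + 1 := by omega
    rw [hpos]
    conv_lhs => rw [loopB]
    conv_rhs => rw [loopB]
    have hnext : nextP primes num hp = nextP primes (num + 1) hp := by
      rw [nextP, dif_neg (by simp [htest])]
    simp only [hnext]
  | case3 primes num hlt =>
    intro _ prod hp hn
    rw [List.drop_length]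
    have h0 : (count - (primes.length : Int)).toNat = 0 := by omega
    rw [h0]
    rfl

-- ===== VERDICT (by name: the statement is the Claim_ definition above) =====
theorem product_of_first_n_primes_spec : Claim_equal_product_of_first_n_primes := by
  intro count _
  unfold Spec_product_of_first_n_primes product_of_first_n_primes product_of_first_n_primes_alt
  have hInv : LoopInv [] 2 :=
    ⟨le_refl 2, List.Pairwise.nil, by simp, fun q hq hlt => absurd hq.two_le (by omega)⟩
  have := main_bridge count [] 2 hInv 1 (by intro p h; cases h) (le_refl 2)
  simp only [List.length_nil, Nat.cast_zero, Int.sub_zero, List.drop_zero] at this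
  exact this
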